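-- pv_equiv track=rewrite | github.com/jordanpainter/diallm-rl | src/dpo.py | hard_trim_completion
-- ===== SOURCE A (Python) =====
-- from typing import Any, Dict, List, Optional, Tuple
--
-- def hard_trim_completion(text: str, stop_strings) -> str:
--     if not text:
--         return text
--     cut: Optional[int] = None
--     for s in stop_strings:
--         if not s:
--             continue
--         idx = text.find(s)
--         if idx != -1:
--             cut = idx if cut is None else min(cut, idx)
--     return text[:cut].rstrip() if cut is not None else text
-- ===== SOURCE B (Python) =====
-- def hard_trim_completion(text: str, stop_strings) -> str:
--     stops = [s for s in stop_strings if s]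
--     if not text or not stops:
--         return text
--     for i in range(len(text)):
--         if any(text.startswith(s, i) for s in stops):
--             return text[:i].rstrip()
--     return text
-- ===== Notes on version B (the rewrite author's own statement) =====
-- stated objective: faster
-- what changed: Replaces the per-stop-string find()+running-min loop by a single left-to-right scan over text positions that returns at the first position where any non-empty stop string starts.
import Mathlib
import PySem

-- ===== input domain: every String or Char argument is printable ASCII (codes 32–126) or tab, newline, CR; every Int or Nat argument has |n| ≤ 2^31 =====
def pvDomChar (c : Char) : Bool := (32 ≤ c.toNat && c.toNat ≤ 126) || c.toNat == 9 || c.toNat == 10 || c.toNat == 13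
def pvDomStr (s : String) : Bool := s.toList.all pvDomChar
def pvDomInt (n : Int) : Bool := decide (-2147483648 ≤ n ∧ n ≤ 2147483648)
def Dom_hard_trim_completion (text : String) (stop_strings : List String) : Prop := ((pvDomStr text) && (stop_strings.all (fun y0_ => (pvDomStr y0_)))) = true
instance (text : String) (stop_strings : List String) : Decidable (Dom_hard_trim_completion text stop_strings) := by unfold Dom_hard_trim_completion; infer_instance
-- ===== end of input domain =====

-- B replaces A's per-stop find()+running-min loop with one left-to-right scan over text
-- positions, returning at the first position where any non-empty stop string starts (alternative).

-- ===== PORT A =====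
def hard_trim_completion (text : String) (stop_strings : List String) : String :=
  if text = "" then text
  else
    let cut : Option Int := stop_strings.foldl (fun cut s =>
      if s = "" then cut
      else
        let idx := PySem.Str.find text s
        if idx ≠ -1 then
          some (match cut with | none => idx | some c => min c idx)
        else cut) none
    match cut with
    | some c => PySem.Str.rstrip (PySem.Str.slice text none (some c))
    | none => text

-- ===== PORT B =====
-- text.startswith(s, i) for 0 ≤ i ≤ len(text): exact as prefix test on the dropped tail
def altHitAt (text : String) (stops : List String) (i : Nat) : Bool :=
  stops.any (fun s => PySem.Chars.startswith (text.toList.drop i) s.toList)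

-- the 'for i in range(len(text))' loop of Source B with its early return
def altScan (text : String) (stops : List String) (i : Nat) : String :=
  if _h : i < text.toList.length then
    if altHitAt text stops i then
      PySem.Str.rstrip (PySem.Str.slice text none (some (i : Int)))
    else altScan text stops (i + 1)
  else text
termination_by text.toList.length - i
decreasing_by
  have h2 : i < text.length := by simpa using _h
  simp only [String.length_toList]
  omega

def hard_trim_completion_alt (text : String) (stop_strings : List String) : String :=
  let stops := stop_strings.filter (fun s => s ≠ "")
  if text = "" ∨ stops = [] then text
  else altScan text stops 0

-- ===== PRECONDITION & SPEC =====
def Spec_hard_trim_completion (text : String) (stop_strings : List String) (out : String) : Prop := out = hard_trim_completion_alt text stop_strings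
instance (text : String) (stop_strings : List String) (out : String) : Decidable (Spec_hard_trim_completion text stop_strings out) := by unfold Spec_hard_trim_completion; infer_instance

-- ===== CLAIM (what is proved, stated in full; the proofs are below) =====
def Claim_equal_hard_trim_completion : Prop := ∀ (text : String) (stop_strings : List String), Dom_hard_trim_completion text stop_strings → Spec_hard_trim_completion text stop_strings (hard_trim_completion text stop_strings)

-- ===== LEMMAS AND PROOFS =====

-- some non-empty stop string of `stops` starts at position i of `cs`
def Hit (cs : List Char) (stops : List String) (i : Nat) : Prop :=
  ∃ s ∈ stops, s ≠ "" ∧ s.toList <+: cs.drop i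

-- min of two optional indices (none = +∞)
def optMin : Option Int → Option Int → Option Int
  | none, b => b
  | some a, none => some a
  | some a, some b => some (min a b)

def stepA (text : String) : Option Int → String → Option Int := fun cut s =>
  if s = "" then cut
  else
    let idx := PySem.Str.find text s
    if idx ≠ -1 then
      some (match cut with | none => idx | some c => min c idx)
    else cut

theorem stepA_eq (text : String) (acc : Option Int) (s : String) :
    stepA text acc s = optMin acc (stepA text none s) := by
  cases acc <;> simp [stepA] <;> split_ifs <;> simp [optMin]

theorem optMin_assoc (a b c : Option Int) :
    optMin (optMin a b) c = optMin a (optMin b c) := by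
  cases a <;> cases b <;> cases c <;> simp [optMin, min_assoc]

theorem foldA_shift (text : String) (stops : List String) (acc : Option Int) :
    stops.foldl (stepA text) acc = optMin acc (stops.foldl (stepA text) none) := by
  induction stops generalizing acc with
  | nil => cases acc <;> simp [optMin]
  | cons s r ih =>
    simp only [List.foldl_cons]
    rw [ih (stepA text acc s), stepA_eq, optMin_assoc, ← ih (stepA text none s)]

theorem hit_cons (cs : List Char) (s : String) (r : List String) (i : Nat) :
    Hit cs (s :: r) i ↔ (s ≠ "" ∧ s.toList <+: cs.drop i) ∨ Hit cs r i := by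
  constructor
  · rintro ⟨t, ht, h1, h2⟩
    rcases List.mem_cons.mp ht with h | h
    · exact Or.inl ⟨h ▸ h1, h ▸ h2⟩
    · exact Or.inr ⟨t, h, h1, h2⟩
  · rintro (⟨h1, h2⟩ | ⟨t, ht, h1, h2⟩)
    · exact ⟨s, List.mem_cons_self .., h1, h2⟩
    · exact ⟨t, List.mem_cons_of_mem _ ht, h1, h2⟩

-- the fold of A computes the least Hit position (or none)
theorem foldA_char (text : String) (stops : List String) :
    (stops.foldl (stepA text) none = none → ∀ i, ¬ Hit text.toList stops i) ∧
    (∀ c, stops.foldl (stepA text) none = some c →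
      ∃ n : Nat, c = (n : Int) ∧ Hit text.toList stops n ∧ ∀ j < n, ¬ Hit text.toList stops j) := by
  induction stops with
  | nil =>
    refine ⟨fun _ i h => ?_, fun c hc => by simp at hc⟩
    rcases h with ⟨s, hs, _⟩; simp at hs
  | cons s r ih =>
    have hshift := foldA_shift text r (stepA text none s)
    by_cases hs : s = ""
    · -- empty stop string: skipped
      have hstep : stepA text none s = none := by simp [stepA, hs]
      constructor
      · intro hnone i hh
        rw [List.foldl_cons, hstep] at hnone
        rcases (hit_cons _ _ _ _).mp hh with ⟨h1, _⟩ | h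
        · exact h1 hs
        · exact ih.1 hnone i h
      · intro c hc
        rw [List.foldl_cons, hstep] at hc
        obtain ⟨n, h1, h2, h3⟩ := ih.2 c hc
        exact ⟨n, h1, (hit_cons _ _ _ _).mpr (Or.inr h2),
          fun j hj hh => by
            rcases (hit_cons _ _ _ _).mp hh with ⟨h4, _⟩ | h4
            · exact h4 hs
            · exact h3 j hj h4⟩
    · by_cases hf : PySem.Str.find text s = -1
      · -- s does not occur in text at all
        have hfC : PySem.Chars.find text.toList s.toList = -1 := by
          rwa [PySem.Str.find_eq] at hf
        have hnoocc : ∀ i, ¬ s.toList <+: text.toList.drop i := by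
          intro i hpre
          have hin : PySem.Chars.isIn s.toList text.toList = true :=
            (PySem.Chars.exists_prefix_drop_iff_isIn _ _).mp ⟨i, hpre⟩
          have : s.toList <:+: text.toList := (PySem.Chars.isIn_iff_infix _ _).mp hin
          exact (PySem.Chars.find_eq_neg_one_iff _ _).mp hfC this
        have hstep : stepA text none s = none := by simp [stepA, hs, hfC]
        constructor
        · intro hnone i hh
          rw [List.foldl_cons, hstep] at hnone
          rcases (hit_cons _ _ _ _).mp hh with ⟨_, h2⟩ | h
          · exact hnoocc i h2
          · exact ih.1 hnone i h
        · intro c hc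
          rw [List.foldl_cons, hstep] at hc
          obtain ⟨n, h1, h2, h3⟩ := ih.2 c hc
          exact ⟨n, h1, (hit_cons _ _ _ _).mpr (Or.inr h2),
            fun j hj hh => by
              rcases (hit_cons _ _ _ _).mp hh with ⟨_, h4⟩ | h4
              · exact hnoocc j h4
              · exact h3 j hj h4⟩
      · -- s occurs: find text s points at its first occurrence
        have hfC : PySem.Chars.find text.toList s.toList ≠ -1 := by
          rwa [PySem.Str.find_eq] at hf
        have hnn : (0 : Int) ≤ PySem.Chars.find text.toList s.toList := by
          have := PySem.Chars.neg_one_le_find text.toList s.toList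
          omega
        have hspec := PySem.Chars.find_spec (s := text.toList) (sub := s.toList) hnn
        set m : Nat := (PySem.Chars.find text.toList s.toList).toNat with hm
        have hms : PySem.Str.find text s = (m : Int) := by
          rw [PySem.Str.find_eq]; omega
        have hstep : stepA text none s = some (m : Int) := by
          have h0 : stepA text none s = some (PySem.Str.find text s) := by
            simp [stepA, hs, hfC]
          rw [h0, hms]
        rw [hstep] at hshift
        have hhitm : Hit text.toList (s :: r) m :=
          (hit_cons _ _ _ _).mpr (Or.inl ⟨hs, hspec.1⟩)
        constructor
        · intro hnone
          rw [List.foldl_cons, hstep, hshift] at hnone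
          cases hr : r.foldl (stepA text) none <;> rw [hr] at hnone <;> simp [optMin] at hnone
        · intro c hc
          rw [List.foldl_cons, hstep, hshift] at hc
          cases hr : r.foldl (stepA text) none with
          | none =>
            rw [hr] at hc; simp only [optMin, Option.some.injEq] at hc
            refine ⟨m, hc.symm, hhitm, fun j hj hh => ?_⟩
            rcases (hit_cons _ _ _ _).mp hh with ⟨_, h4⟩ | h4
            · exact hspec.2 j hj h4
            · exact ih.1 hr j h4
          | some c' =>
            rw [hr] at hc; simp only [optMin, Option.some.injEq] at hc
            obtain ⟨n, hn1, hn2, hn3⟩ := ih.2 c' hr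
            rcases le_total ((m : Int)) c' with hle | hle
            · have hcm : c = (m : Int) := by omega
              refine ⟨m, hcm, hhitm, fun j hj hh => ?_⟩
              rcases (hit_cons _ _ _ _).mp hh with ⟨_, h4⟩ | h4
              · exact hspec.2 j hj h4
              · exact hn3 j (by omega) h4
            · have hcn : c = (n : Int) := by omega
              refine ⟨n, hcn, (hit_cons _ _ _ _).mpr (Or.inr hn2), fun j hj hh => ?_⟩
              rcases (hit_cons _ _ _ _).mp hh with ⟨_, h4⟩ | h4
              · exact hspec.2 j (by omega) h4
              · exact hn3 j hj h4

-- B's position test agrees with Hit over the unfiltered list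
theorem altHitAt_iff (text : String) (stop_strings : List String) (i : Nat) :
    altHitAt text (stop_strings.filter (fun s => s ≠ "")) i = true ↔
      Hit text.toList stop_strings i := by
  simp only [altHitAt, List.any_eq_true, List.mem_filter, Hit, decide_eq_true_eq,
    PySem.Chars.startswith_iff]
  constructor
  · rintro ⟨s, ⟨hs, hne⟩, hp⟩; exact ⟨s, hs, hne, hp⟩
  · rintro ⟨s, hs, hne, hp⟩; exact ⟨s, ⟨hs, hne⟩, hp⟩

theorem hit_lt_length (cs : List Char) (stops : List String) (i : Nat)
    (h : Hit cs stops i) : i < cs.length := by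
  rcases h with ⟨s, _, hne, hp⟩
  by_contra hge
  rw [List.drop_eq_nil_of_le (by omega)] at hp
  exact hne (String.toList_eq_nil_iff.mp (List.prefix_nil.mp hp))

theorem altScan_no_hit (text : String) (stops : List String) (i : Nat)
    (h : ∀ j, i ≤ j → altHitAt text stops j = false) :
    altScan text stops i = text := by
  rw [altScan.eq_def]
  split
  · rw [h i le_rfl]
    simp only [Bool.false_eq_true, if_false]
    exact altScan_no_hit text stops (i + 1) (fun j hj => h j (by omega))
  · rfl
termination_by text.toList.length - i
decreasing_by
  simp only [String.length_toList] at *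
  omega

theorem altScan_hit (text : String) (stops : List String) (i n : Nat)
    (hin : i ≤ n) (hn : n < text.toList.length)
    (hhit : altHitAt text stops n = true)
    (hmin : ∀ j, i ≤ j → j < n → altHitAt text stops j = false) :
    altScan text stops i = PySem.Str.rstrip (PySem.Str.slice text none (some (n : Int))) := by
  rw [altScan.eq_def]
  rcases eq_or_lt_of_le hin with heq | hlt
  · subst heq
    rw [dif_pos hn, if_pos hhit]
  · rw [dif_pos (by omega), hmin i le_rfl hlt]
    simp only [Bool.false_eq_true, if_false]
    exact altScan_hit text stops (i + 1) n (by omega) hn hhit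
      (fun j hj hj2 => hmin j (by omega) hj2)
termination_by text.toList.length - i
decreasing_by
  simp only [String.length_toList] at *
  omega

-- all-empty stop list: A's fold yields none
theorem foldA_all_empty (text : String) (stops : List String)
    (h : ∀ s ∈ stops, s = "") : stops.foldl (stepA text) none = none := by
  induction stops with
  | nil => rfl
  | cons s r ih =>
    rw [List.foldl_cons]
    have hs : s = "" := h s (List.mem_cons_self ..)
    simp only [stepA, if_pos hs]
    exact ih (fun t ht => h t (List.mem_cons_of_mem _ ht))

-- ===== VERDICT (by name: the statement is the Claim_ definition above) =====
theorem hard_trim_completion_spec : Claim_equal_hard_trim_completion := by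
  intro text stop_strings _
  show hard_trim_completion text stop_strings = hard_trim_completion_alt text stop_strings
  by_cases ht : text = ""
  · simp [hard_trim_completion, hard_trim_completion_alt, ht]
  · show (if text = "" then text else
      match stop_strings.foldl (stepA text) none with
      | some c => PySem.Str.rstrip (PySem.Str.slice text none (some c))
      | none => text) =
      (if text = "" ∨ stop_strings.filter (fun s => s ≠ "") = [] then text
       else altScan text (stop_strings.filter (fun s => s ≠ "")) 0)
    rw [if_neg ht]
    by_cases hfilt : stop_strings.filter (fun s => s ≠ "") = []
    · rw [if_pos (Or.inr hfilt)]
      have hall : ∀ s ∈ stop_strings, s = "" := by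
        intro s hs
        have := List.filter_eq_nil_iff.mp hfilt s hs
        simpa using this
      rw [foldA_all_empty text stop_strings hall]
    · rw [if_neg (by rw [not_or]; exact ⟨ht, hfilt⟩)]
      have hchar := foldA_char text stop_strings
      cases hr : stop_strings.foldl (stepA text) none with
      | none =>
        exact (altScan_no_hit text _ 0 (fun j _ => by
          rw [← Bool.not_eq_true, altHitAt_iff]
          exact hchar.1 hr j)).symm
      | some c =>
        obtain ⟨n, hn1, hn2, hn3⟩ := hchar.2 c hr
        rw [hn1]
        exact (altScan_hit text _ 0 n (Nat.zero_le n) (hit_lt_length _ _ _ hn2)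
          ((altHitAt_iff ..).mpr hn2)
          (fun j _ hj => by rw [← Bool.not_eq_true, altHitAt_iff]; exact hn3 j hj)).symm
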